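-- pv_equiv track=rewrite | github.com/Jiaweihu08/EPI | 12 - Hash Tables/12.7 - smallest_subarray_covering_all_values_sequentially.py | find_smallest_sequentially_covering_subset
-- ===== SOURCE A (Python) =====
-- import collections
--
-- Subarray = collections.namedtuple('Subarray', ('start', 'end'))
--
-- def find_smallest_sequentially_covering_subset(paragraph, keywords):
-- 	keyword_to_idx = {k: i for i, k in enumerate(keywords)}
-- 	latest_occurrence = [-1] * len(keywords)
-- 	shortest_subarray_length = [float('inf')] * len(keywords)
-- 	shortest_distance = float('inf')
-- 	result = Subarray(start=-1, end=-1)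
-- 	for i, p in enumerate(paragraph):
-- 		if p in keyword_to_idx:
-- 			keyword_idx = keyword_to_idx[p]
-- 			if keyword_idx == 0:
-- 				shortest_subarray_length[keyword_idx] = 1
-- 			elif shortest_subarray_length[keyword_idx - 1] != float('inf'):
-- 				distance_to_previous_keyword = (
-- 					i - latest_occurrence[keyword_idx - 1])
-- 				shortest_subarray_length[keyword_idx] = (
-- 					distance_to_previous_keyword +
-- 					shortest_subarray_length[keyword_idx - 1])
--
-- 			latest_occurrence[keyword_idx] = i
--
-- 			if (keyword_idx == len(keywords) - 1
-- 					and shortest_subarray_length[-1] < shortest_distance):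
-- 				shortest_distance = shortest_subarray_length[-1]
-- 				result = Subarray(start=i - shortest_distance + 1, end=i)
-- 	return result
-- ===== SOURCE B (Python) =====
-- import collections
--
-- Subarray = collections.namedtuple('Subarray', ('start', 'end'))
--
-- def _chain_len(paragraph, kidx, j, q):
-- 	# length of the greedy backward chain ending with keyword j at position q, or None
-- 	length = 1
-- 	while j > 0:
-- 		t = None
-- 		for s in range(q - 1, -1, -1):
-- 			if kidx.get(paragraph[s]) == j - 1:
-- 				t = s
-- 				break
-- 		if t is None:
-- 			return None
-- 		length += q - t
-- 		j, q = j - 1, t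
-- 	return length
--
-- def find_smallest_sequentially_covering_subset(paragraph, keywords):
-- 	kidx = {k: i for i, k in enumerate(keywords)}
-- 	last = len(keywords) - 1
-- 	best = None  # (length, end), first strictly-smallest wins
-- 	for i, p in enumerate(paragraph):
-- 		if kidx.get(p) == last:
-- 			length = _chain_len(paragraph, kidx, last, i)
-- 			if length is not None and (best is None or length < best[0]):
-- 				best = (length, i)
-- 	if best is None:
-- 		return Subarray(start=-1, end=-1)
-- 	return Subarray(start=best[1] - best[0] + 1, end=best[1])
-- ===== Notes on version B (the rewrite author's own statement) =====
-- stated objective: alternative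
-- what changed: A's single forward pass maintaining per-keyword latest-occurrence and running shortest-length DP arrays is replaced by an array-free recomputation: for each occurrence of the last keyword, walk a greedy backward chain (latest earlier occurrence of each previous keyword) to find the window start, keeping the first strictly shortest window.
import Mathlib
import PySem

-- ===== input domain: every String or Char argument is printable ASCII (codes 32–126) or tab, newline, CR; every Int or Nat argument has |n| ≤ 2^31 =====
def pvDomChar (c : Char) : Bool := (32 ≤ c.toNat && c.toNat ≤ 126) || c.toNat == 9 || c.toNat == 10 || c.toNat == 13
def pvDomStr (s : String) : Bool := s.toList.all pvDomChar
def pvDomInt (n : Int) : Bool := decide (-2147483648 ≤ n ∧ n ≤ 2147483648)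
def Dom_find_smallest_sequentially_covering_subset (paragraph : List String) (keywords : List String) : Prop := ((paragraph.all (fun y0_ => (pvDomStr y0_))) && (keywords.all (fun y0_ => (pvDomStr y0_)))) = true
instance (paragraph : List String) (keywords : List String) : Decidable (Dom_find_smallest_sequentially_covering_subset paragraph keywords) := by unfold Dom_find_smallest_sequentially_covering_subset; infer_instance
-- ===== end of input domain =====

-- B replaces A's forward one-pass DP (latest-occurrence + running-length arrays) by an
-- on-demand backward greedy chain walk per occurrence of the last keyword (alternative
-- decomposition, no arrays; not claimed faster).


-- ===== PORT A =====
-- the dict comprehension {k: i for i, k in enumerate(keywords)} (shared by both Pythons verbatim)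
def kwIndex (keywords : List String) : PySem.Dict String Int :=
  (PySem.List.enumerate keywords).foldl (fun d ik => d.insert ik.2 ik.1) PySem.Dict.empty

-- `x < y` where `none` plays float('inf') (Python: inf < inf is False)
def pyInfLt : Option Int → Option Int → Bool
  | some x, some y => decide (x < y)
  | some _, none => true
  | none, _ => false

-- loop body of A; state = (latest_occurrence, shortest_subarray_length, shortest_distance, result)
def stepA (kdict : PySem.Dict String Int) (m : Nat)
    (st : List Int × List (Option Int) × Option Int × (Int × Int)) (ip : Int × String) :
    List Int × List (Option Int) × Option Int × (Int × Int) :=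
  match kdict.get? ip.2 with
  | none => st
  | some kj =>
    let lens' :=
      if kj = 0 then st.2.1.set kj.toNat (some 1)
      else
        match (PySem.List.pyGet? st.2.1 (kj - 1)).getD none with
        | none => st.2.1
        | some prev =>
          st.2.1.set kj.toNat
            (some ((ip.1 - (PySem.List.pyGet? st.1 (kj - 1)).getD (-1)) + prev))
    let latest' := st.1.set kj.toNat ip.1
    if kj = (m : Int) - 1 ∧ pyInfLt ((PySem.List.pyGet? lens' (-1)).getD none) st.2.2.1 then
      match (PySem.List.pyGet? lens' (-1)).getD none with
      | some d => (latest', lens', some d, (ip.1 - d + 1, ip.1))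
      | none => (latest', lens', none, st.2.2.2)  -- unreachable: pyInfLt none _ = false
    else (latest', lens', st.2.2.1, st.2.2.2)

def find_smallest_sequentially_covering_subset (paragraph : List String) (keywords : List String) : Int × Int :=
  let m := keywords.length
  (((PySem.List.enumerate paragraph).foldl (stepA (kwIndex keywords) m)
      (List.replicate m (-1 : Int), List.replicate m (none : Option Int), none, (-1, -1))).2.2.2)

-- ===== PORT B =====
-- latest position t < q with kidx.get(paragraph[t]) == j (the backward scan of _chain_len)
def latestBefore (paragraph : List String) (kdict : PySem.Dict String Int) (j : Int) : Nat → Option Nat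
  | 0 => none
  | t + 1 =>
    if kdict.get? (PySem.List.pyGetD paragraph (t : Int) "") = some j then some t
    else latestBefore paragraph kdict j t

-- _chain_len: the while loop walking the greedy backward chain, accumulating `length` (starts at 1)
def chainLenAux (paragraph : List String) (kdict : PySem.Dict String Int) :
    Nat → Nat → Int → Option Int
  | 0, _, acc => some acc
  | j + 1, q, acc =>
    match latestBefore paragraph kdict (j : Int) q with
    | none => none
    | some t => chainLenAux paragraph kdict j t (acc + ((q : Int) - (t : Int)))

-- loop body of B; best = (length, end) of the first strictly-smallest full chain so far
def stepB (paragraph : List String) (kdict : PySem.Dict String Int) (last : Int) (m1 : Nat)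
    (best : Option (Int × Int)) (ip : Int × String) : Option (Int × Int) :=
  if kdict.get? ip.2 = some last then
    match chainLenAux paragraph kdict m1 ip.1.toNat 1 with
    | none => best
    | some L =>
      match best with
      | none => some (L, ip.1)
      | some b => if L < b.1 then some (L, ip.1) else best
  else best

def find_smallest_sequentially_covering_subset_alt (paragraph : List String) (keywords : List String) : Int × Int :=
  match (PySem.List.enumerate paragraph).foldl
      (stepB paragraph (kwIndex keywords) ((keywords.length : Int) - 1) (keywords.length - 1)) none with
  | none => (-1, -1)
  | some (L, e) => (e - L + 1, e)

-- ===== PRECONDITION & SPEC =====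
def Spec_find_smallest_sequentially_covering_subset (paragraph : List String) (keywords : List String) (out : Int × Int) : Prop := out = find_smallest_sequentially_covering_subset_alt paragraph keywords
instance (paragraph : List String) (keywords : List String) (out : Int × Int) : Decidable (Spec_find_smallest_sequentially_covering_subset paragraph keywords out) := by unfold Spec_find_smallest_sequentially_covering_subset; infer_instance

-- ===== CLAIM (what is proved, stated in full; the proofs are below) =====
def Claim_equal_find_smallest_sequentially_covering_subset : Prop := ∀ (paragraph : List String) (keywords : List String), Dom_find_smallest_sequentially_covering_subset paragraph keywords → Spec_find_smallest_sequentially_covering_subset paragraph keywords (find_smallest_sequentially_covering_subset paragraph keywords)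

-- ===== LEMMAS AND PROOFS =====

-- the running best of B vs the (shortest_distance, result) pair of A
def InvRel (dr : Option Int × (Int × Int)) (best : Option (Int × Int)) : Prop :=
  match best with
  | none => dr = (none, (-1, -1))
  | some (L, e) => dr = (some L, (e - L + 1, e))

-- recursive (non-accumulator) restatement of B's backward chain walk, for the proofs
def chainLen (paragraph : List String) (kdict : PySem.Dict String Int) : Nat → Nat → Option Int
  | 0, _ => some 1
  | j + 1, q =>
    (latestBefore paragraph kdict (j : Int) q).bind fun t =>
      (chainLen paragraph kdict j t).map fun s => ((q : Int) - (t : Int)) + s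

lemma chainLenAux_eq (paragraph : List String) (kdict : PySem.Dict String Int) :
    ∀ (j q : Nat) (acc : Int), chainLenAux paragraph kdict j q acc =
      (chainLen paragraph kdict j q).map (fun s => acc + s - 1) := by
  intro j
  induction j with
  | zero => intro q acc; simp [chainLenAux, chainLen]
  | succ j ihj =>
    intro q acc
    rw [chainLenAux, chainLen]
    rcases latestBefore paragraph kdict (j : Int) q with _ | t
    · rfl
    · simp only [Option.bind_some, ihj, Option.map_map]
      congr 1
      funext s
      simp only [Function.comp_apply]
      ring

lemma chainLenAux_one (paragraph : List String) (kdict : PySem.Dict String Int) (j q : Nat) :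
    chainLenAux paragraph kdict j q 1 = chainLen paragraph kdict j q := by
  rw [chainLenAux_eq]
  rcases chainLen paragraph kdict j q with _ | s
  · rfl
  · simp

-- A's state after the prefix of length i, characterised through B's chain functions
def StInv (para : List String) (kdict : PySem.Dict String Int) (m : Nat) (i : Nat)
    (st : List Int × List (Option Int) × Option Int × (Int × Int)) (best : Option (Int × Int)) : Prop :=
  st.1.length = m ∧ st.2.1.length = m ∧
  (∀ jn : Nat, jn < m →
    st.1[jn]? = some (match latestBefore para kdict (jn : Int) i with | some t => (t : Int) | none => -1) ∧
    st.2.1[jn]? = some ((latestBefore para kdict (jn : Int) i).bind fun q => chainLen para kdict jn q)) ∧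
  InvRel st.2.2 best

lemma kwIndex_values (keywords : List String) (p : String) (v : Int)
    (h : (kwIndex keywords).get? p = some v) : ∃ jn : Nat, v = (jn : Int) ∧ jn < keywords.length := by
  have gen : ∀ (l : List (Int × String)) (d : PySem.Dict String Int),
      (∀ ik ∈ l, ∃ jn : Nat, ik.1 = (jn : Int) ∧ jn < keywords.length) →
      (∀ p v, d.get? p = some v → ∃ jn : Nat, v = (jn : Int) ∧ jn < keywords.length) →
      ∀ p v, (l.foldl (fun d ik => d.insert ik.2 ik.1) d).get? p = some v →
        ∃ jn : Nat, v = (jn : Int) ∧ jn < keywords.length := by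
    intro l
    induction l with
    | nil => intro d _ hd p v hv; exact hd p v hv
    | cons ik l ihl =>
      intro d hl hd p v hv
      refine ihl (d.insert ik.2 ik.1) (fun x hx => hl x (by simp [hx])) ?_ p v hv
      intro p' v' hv'
      rw [PySem.Dict.get?_insert] at hv'
      split at hv'
      · exact (Option.some.inj hv') ▸ hl ik (by simp)
      · exact hd p' v' hv'
  refine gen _ _ ?_ (by simp [PySem.Dict.get?_empty]) p v h
  intro ik hik
  rw [PySem.List.mem_enumerate_iff] at hik
  obtain ⟨k, hk, rfl⟩ := hik
  exact ⟨k, by simp, hk⟩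

lemma latestBefore_some (para : List String) (kd : PySem.Dict String Int) (j : Int) (q t : Nat)
    (h : latestBefore para kd j q = some t) :
    t < q ∧ kd.get? (PySem.List.pyGetD para (t : Int) "") = some j := by
  induction q with
  | zero => simp [latestBefore] at h
  | succ q ihq =>
    rw [latestBefore] at h
    split at h
    · cases h; exact ⟨Nat.lt_succ_self _, by assumption⟩
    · exact ⟨Nat.lt_succ_of_lt (ihq h).1, (ihq h).2⟩

lemma latestBefore_mono (para : List String) (kd : PySem.Dict String Int) (j : Int) (q q' t : Nat)
    (hq : q ≤ q') (h : latestBefore para kd j q = some t) :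
    ∃ t', latestBefore para kd j q' = some t' ∧ t ≤ t' := by
  induction q' with
  | zero =>
    have : q = 0 := Nat.le_zero.mp hq
    exact ⟨t, this ▸ h, le_refl t⟩
  | succ q' ihq =>
    by_cases hqe : q = q' + 1
    · exact ⟨t, hqe ▸ h, le_refl t⟩
    · have hle : q ≤ q' := by omega
      obtain ⟨t', ht', htt'⟩ := ihq hle
      rw [latestBefore]
      split
      · exact ⟨q', rfl, le_trans htt' (Nat.le_of_lt (latestBefore_some para kd j q' t' ht').1)⟩
      · exact ⟨t', ht', htt'⟩

lemma chainLen_mono (para : List String) (kd : PySem.Dict String Int) (j : Nat) (q q' : Nat)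
    (hq : q ≤ q') (h : (chainLen para kd j q).isSome) : (chainLen para kd j q').isSome := by
  induction j generalizing q q' with
  | zero => simp [chainLen]
  | succ j ihj =>
    rw [chainLen] at h ⊢
    rcases hlb : latestBefore para kd (j : Int) q with _ | t
    · simp [hlb] at h
    · rw [hlb] at h
      simp only [Option.bind_some] at h
      obtain ⟨t', ht', htt'⟩ := latestBefore_mono para kd (j : Int) q q' t hq hlb
      rw [ht']
      simp only [Option.bind_some, Option.isSome_map] at h ⊢
      exact ihj t t' htt' h

lemma chainLen_none_of_le (para : List String) (kd : PySem.Dict String Int) (j : Nat) (q q' : Nat)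
    (hq : q ≤ q') (h : chainLen para kd j q' = none) : chainLen para kd j q = none := by
  rcases hc : chainLen para kd j q with _ | s
  · rfl
  · have := chainLen_mono para kd j q q' hq (by simp [hc])
    rw [h] at this; simp at this

lemma step_inv (para keywords : List String) (i : Nat) (y : String)
    (st : List Int × List (Option Int) × Option Int × (Int × Int)) (best : Option (Int × Int))
    (hy : para[i]? = some y)
    (hInv : StInv para (kwIndex keywords) keywords.length i st best) :
    StInv para (kwIndex keywords) keywords.length (i + 1)
      (stepA (kwIndex keywords) keywords.length st ((i : Int), y))
      (stepB para (kwIndex keywords) ((keywords.length : Int) - 1) (keywords.length - 1) best ((i : Int), y)) := by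
  obtain ⟨hlen1, hlen2, hptr, hrel⟩ := hInv
  have hyget : PySem.List.pyGetD para ((i : Nat) : Int) "" = y := by
    rw [PySem.List.pyGetD_natCast, List.getD_eq_getElem?_getD, hy]; rfl
  have hLB : ∀ j : Int, latestBefore para (kwIndex keywords) j (i + 1) =
      (if (kwIndex keywords).get? y = some j then some i
       else latestBefore para (kwIndex keywords) j i) := by
    intro j; rw [latestBefore, hyget]
  rcases hget : (kwIndex keywords).get? y with _ | kj
  · -- the word is not a keyword: both states unchanged
    have hA : stepA (kwIndex keywords) keywords.length st ((i : Int), y) = st := by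
      simp [stepA, hget]
    have hB : stepB para (kwIndex keywords) ((keywords.length : Int) - 1)
        (keywords.length - 1) best ((i : Int), y) = best := by
      simp [stepB, hget]
    rw [hA, hB]
    refine ⟨hlen1, hlen2, ?_, hrel⟩
    intro jn hjn
    rw [hLB ((jn : Nat) : Int), if_neg (by simp [hget])]
    exact hptr jn hjn
  · obtain ⟨jn0, rfl, hjn0⟩ := kwIndex_values keywords y kj hget
    have hm1 : 1 ≤ keywords.length := by omega
    have hLBj0 : latestBefore para (kwIndex keywords) ((jn0 : Nat) : Int) (i + 1) = some i := by
      rw [hLB, if_pos hget]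
    have hLBne : ∀ jn : Nat, jn ≠ jn0 →
        latestBefore para (kwIndex keywords) ((jn : Nat) : Int) (i + 1) =
          latestBefore para (kwIndex keywords) ((jn : Nat) : Int) i := by
      intro jn hne
      rw [hLB, if_neg]
      rw [hget]
      simp only [Option.some.injEq]
      intro hcast
      exact hne (by exact_mod_cast hcast.symm)
    -- the common tail: latest' and the dist/result update, given a characterised lens'
    have key : ∀ (L' : List (Option Int)),
        L'.length = keywords.length →
        (∀ jn : Nat, jn < keywords.length → L'[jn]? =
          some ((latestBefore para (kwIndex keywords) ((jn : Nat) : Int) (i + 1)).bind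
            fun q => chainLen para (kwIndex keywords) jn q)) →
        StInv para (kwIndex keywords) keywords.length (i + 1)
          (if ((jn0 : Nat) : Int) = (keywords.length : Int) - 1 ∧
               pyInfLt ((PySem.List.pyGet? L' (-1)).getD none) st.2.2.1 = true then
             match (PySem.List.pyGet? L' (-1)).getD none with
             | some d => (st.1.set jn0 ((i : Nat) : Int), L', some d,
                 (((i : Nat) : Int) - d + 1, ((i : Nat) : Int)))
             | none => (st.1.set jn0 ((i : Nat) : Int), L', none, st.2.2.2)
           else (st.1.set jn0 ((i : Nat) : Int), L', st.2.2.1, st.2.2.2))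
          (stepB para (kwIndex keywords) ((keywords.length : Int) - 1) (keywords.length - 1) best
            (((i : Nat) : Int), y)) := by
      intro L' hL'len hL'ptr
      have flip : (if ((jn0 : Nat) : Int) = (keywords.length : Int) - 1 ∧
               pyInfLt ((PySem.List.pyGet? L' (-1)).getD none) st.2.2.1 = true then
             match (PySem.List.pyGet? L' (-1)).getD none with
             | some d => (st.1.set jn0 ((i : Nat) : Int), L', some d,
                 (((i : Nat) : Int) - d + 1, ((i : Nat) : Int)))
             | none => (st.1.set jn0 ((i : Nat) : Int), L', none, st.2.2.2)
           else (st.1.set jn0 ((i : Nat) : Int), L', st.2.2.1, st.2.2.2)) =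
          (st.1.set jn0 ((i : Nat) : Int), L',
            (if ((jn0 : Nat) : Int) = (keywords.length : Int) - 1 ∧
                 pyInfLt ((PySem.List.pyGet? L' (-1)).getD none) st.2.2.1 = true then
               match (PySem.List.pyGet? L' (-1)).getD none with
               | some d => (some d, (((i : Nat) : Int) - d + 1, ((i : Nat) : Int)))
               | none => (none, st.2.2.2)
             else (st.2.2.1, st.2.2.2))) := by
        split
        · rcases (PySem.List.pyGet? L' (-1)).getD none <;> rfl
        · rfl
      rw [flip]
      set dr' := (if ((jn0 : Nat) : Int) = (keywords.length : Int) - 1 ∧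
                 pyInfLt ((PySem.List.pyGet? L' (-1)).getD none) st.2.2.1 = true then
                match (PySem.List.pyGet? L' (-1)).getD none with
                | some d => (some d, (((i : Nat) : Int) - d + 1, ((i : Nat) : Int)))
                | none => (none, st.2.2.2)
              else (st.2.2.1, st.2.2.2)) with hdr0
      have hdr : dr' = (if ((jn0 : Nat) : Int) = (keywords.length : Int) - 1 ∧
                 pyInfLt ((PySem.List.pyGet? L' (-1)).getD none) st.2.2.1 = true then
                match (PySem.List.pyGet? L' (-1)).getD none with
                | some d => (some d, (((i : Nat) : Int) - d + 1, ((i : Nat) : Int)))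
                | none => (none, st.2.2.2)
              else (st.2.2.1, st.2.2.2)) := hdr0
      have hneg : (PySem.List.pyGet? L' (-1)).getD none =
          (latestBefore para (kwIndex keywords) ((keywords.length - 1 : Nat) : Int) (i + 1)).bind
            fun q => chainLen para (kwIndex keywords) (keywords.length - 1) q := by
        rw [PySem.List.pyGet?_neg_one, List.getLast?_eq_getElem?, hL'len,
          hL'ptr (keywords.length - 1) (by omega)]
        rfl
      refine ⟨by simp [hlen1], hL'len, ?_, ?_⟩
      · intro jn hjn
        refine ⟨?_, hL'ptr jn hjn⟩
        rw [List.getElem?_set]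
        by_cases hje : jn0 = jn
        · subst hje
          rw [if_pos rfl, if_pos (by omega), hLBj0]
        · rw [if_neg hje, hLBne jn (fun h => hje h.symm)]
          exact (hptr jn hjn).1
      · by_cases hj0 : jn0 = keywords.length - 1
        · have hcast : ((jn0 : Nat) : Int) = (keywords.length : Int) - 1 := by
            subst hj0; push_cast [Nat.cast_sub hm1]; ring
          have hBcond : (kwIndex keywords).get? y = some ((keywords.length : Int) - 1) := by
            rw [hget, hcast]
          have hchain : (PySem.List.pyGet? L' (-1)).getD none =
              chainLen para (kwIndex keywords) (keywords.length - 1) i := by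
            rw [hneg, show ((keywords.length - 1 : Nat) : Int) = ((jn0 : Nat) : Int) by rw [hj0],
              hLBj0]
            rfl
          rw [hdr, hchain]
          simp only [stepB, hBcond, if_pos, Int.toNat_natCast, chainLenAux_one]
          rcases hc : chainLen para (kwIndex keywords) (keywords.length - 1) i with _ | L
          · simp only [pyInfLt, Bool.false_eq_true, and_false, if_false]
            simpa using hrel
          · rcases hbest : best with _ | ⟨L0, e0⟩
            · rw [hbest] at hrel
              have hdist : st.2.2.1 = none := by rw [show st.2.2 = (none, (-1, -1)) from hrel]
              rw [hdist]
              simp only [pyInfLt, and_true, if_pos hcast]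
              rfl
            · rw [hbest] at hrel
              have hdr2 : st.2.2 = (some L0, (e0 - L0 + 1, e0)) := hrel
              rw [show st.2.2.1 = some L0 from by rw [hdr2]]
              by_cases hLT : L < L0
              · simp only [pyInfLt, decide_true, and_true, if_pos hcast, hLT, if_pos]
                rfl
              · simp only [pyInfLt, hLT, decide_false, Bool.false_eq_true, and_false, if_false]
                simpa [hdr2] using hrel
        · have hcne : ¬ (((jn0 : Nat) : Int) = (keywords.length : Int) - 1) := by
            intro h; apply hj0; omega
          rw [hdr, if_neg (fun h => hcne h.1)]
          have hBskip : stepB para (kwIndex keywords) ((keywords.length : Int) - 1)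
              (keywords.length - 1) best (((i : Nat) : Int), y) = best := by
            simp only [stepB]
            rw [if_neg]
            rw [hget]
            simp only [Option.some.injEq]
            exact hcne
          rw [hBskip]
          simpa using hrel
    by_cases h0 : jn0 = 0
    · subst h0
      have hptr0 : ∀ jn : Nat, jn < keywords.length → (st.2.1.set 0 (some 1))[jn]? =
          some ((latestBefore para (kwIndex keywords) ((jn : Nat) : Int) (i + 1)).bind
            fun q => chainLen para (kwIndex keywords) jn q) := by
        intro jn hjn
        rw [List.getElem?_set]
        by_cases hje : 0 = jn
        · subst hje
          rw [if_pos rfl, if_pos (by omega)]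
          rw [show latestBefore para (kwIndex keywords) ((0 : Nat) : Int) (i + 1) = some i from hLBj0]
          rfl
        · rw [if_neg hje, hLBne jn (fun h => hje h.symm)]
          exact (hptr jn hjn).2
      have hA := key (st.2.1.set 0 (some 1)) (by simp [hlen2]) hptr0
      simp only [stepA, hget, Nat.cast_zero, Int.toNat_zero, if_pos]
      simpa using hA
    · obtain ⟨n0, rfl⟩ := Nat.exists_eq_succ_of_ne_zero h0
      have hn0lt : n0 < keywords.length := by omega
      have hc1 : ((n0 + 1 : Nat) : Int) - 1 = ((n0 : Nat) : Int) := by push_cast; ring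
      have hreadL : (PySem.List.pyGet? st.2.1 (((n0 + 1 : Nat) : Int) - 1)).getD none =
          (latestBefore para (kwIndex keywords) ((n0 : Nat) : Int) i).bind
            (fun q => chainLen para (kwIndex keywords) n0 q) := by
        rw [hc1, PySem.List.pyGet?_natCast, (hptr n0 hn0lt).2]
        rfl
      have hne0 : ¬ (((n0 + 1 : Nat) : Int) = 0) := by exact_mod_cast Nat.succ_ne_zero n0
      rcases hprev : (latestBefore para (kwIndex keywords) ((n0 : Nat) : Int) i).bind
          (fun q => chainLen para (kwIndex keywords) n0 q) with _ | prev
      · -- predecessor length still undefined: lens is left unchanged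
        have hcnone : chainLen para (kwIndex keywords) (n0 + 1) i = none := by
          rw [chainLen]
          rcases hlbn0 : latestBefore para (kwIndex keywords) ((n0 : Nat) : Int) i with _ | t
          · rfl
          · rw [hlbn0] at hprev
            simp only [Option.bind_some] at hprev
            simp [hprev]
        have hptr1 : ∀ jn : Nat, jn < keywords.length → st.2.1[jn]? =
            some ((latestBefore para (kwIndex keywords) ((jn : Nat) : Int) (i + 1)).bind
              fun q => chainLen para (kwIndex keywords) jn q) := by
          intro jn hjn
          by_cases hje : jn = n0 + 1
          · subst hje
            rw [show latestBefore para (kwIndex keywords) ((n0 + 1 : Nat) : Int) (i + 1) =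
              some i from hLBj0]
            rw [(hptr (n0 + 1) hjn).2]
            congr 1
            show _ = chainLen para (kwIndex keywords) (n0 + 1) i
            rw [hcnone]
            rcases hlb1 : latestBefore para (kwIndex keywords) ((n0 + 1 : Nat) : Int) i with _ | t'
            · rfl
            · have ht' := (latestBefore_some para (kwIndex keywords) _ i t' hlb1).1
              simp only [Option.bind_some]
              exact chainLen_none_of_le para (kwIndex keywords) (n0 + 1) t' i (by omega) hcnone
          · rw [hLBne jn hje]
            exact (hptr jn hjn).2
        have hA := key st.2.1 hlen2 hptr1
        simp only [stepA, hget, if_neg hne0, Int.toNat_natCast]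
        rw [hreadL, hprev]
        exact hA
      · -- predecessor defined: A writes (i - latest[j-1]) + prev at j
        rcases hlbn0 : latestBefore para (kwIndex keywords) ((n0 : Nat) : Int) i with _ | t
        · rw [hlbn0] at hprev; simp at hprev
        · rw [hlbn0] at hprev
          simp only [Option.bind_some] at hprev
          have hreadT : (PySem.List.pyGet? st.1 (((n0 + 1 : Nat) : Int) - 1)).getD (-1) =
              ((t : Nat) : Int) := by
            rw [hc1, PySem.List.pyGet?_natCast, (hptr n0 hn0lt).1, hlbn0]
            rfl
          have hptr2 : ∀ jn : Nat, jn < keywords.length →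
              (st.2.1.set (n0 + 1) (some ((((i : Nat) : Int) - ((t : Nat) : Int)) + prev)))[jn]? =
              some ((latestBefore para (kwIndex keywords) ((jn : Nat) : Int) (i + 1)).bind
                fun q => chainLen para (kwIndex keywords) jn q) := by
            intro jn hjn
            rw [List.getElem?_set]
            by_cases hje : n0 + 1 = jn
            · subst hje
              rw [if_pos rfl, if_pos (by omega)]
              rw [show latestBefore para (kwIndex keywords) ((n0 + 1 : Nat) : Int) (i + 1) =
                some i from hLBj0]
              simp only [Option.bind_some]
              rw [chainLen, hlbn0]
              simp only [Option.bind_some, hprev]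
              rfl
            · rw [if_neg hje, hLBne jn (fun h => hje h.symm)]
              exact (hptr jn hjn).2
          have hA := key (st.2.1.set (n0 + 1) (some ((((i : Nat) : Int) - ((t : Nat) : Int)) + prev)))
            (by simp [hlen2]) hptr2
          simp only [stepA, hget, if_neg hne0, Int.toNat_natCast]
          rw [hreadL, hlbn0]
          simp only [Option.bind_some]
          rw [hprev, hreadT]
          exact hA

lemma main_inv (para keywords : List String) : ∀ (ys : List String) (i : Nat)
    (st : List Int × List (Option Int) × Option Int × (Int × Int)) (best : Option (Int × Int)),
    para.drop i = ys → StInv para (kwIndex keywords) keywords.length i st best →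
    InvRel ((PySem.List.enumerate ys (i : Int)).foldl (stepA (kwIndex keywords) keywords.length) st).2.2
      ((PySem.List.enumerate ys (i : Int)).foldl
        (stepB para (kwIndex keywords) ((keywords.length : Int) - 1) (keywords.length - 1)) best) := by
  intro ys
  induction ys with
  | nil => intro i st best _ hInv; simpa [PySem.List.enumerate_nil] using hInv.2.2.2
  | cons y ys ih =>
    intro i st best hdrop hInv
    have hy : para[i]? = some y := by
      have h1 : (para.drop i)[0]? = some y := by rw [hdrop]; rfl
      rw [List.getElem?_drop] at h1; simpa using h1
    have hdrop' : para.drop (i + 1) = ys := by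
      have h1 : (para.drop i).drop 1 = para.drop (i + 1) := by rw [List.drop_drop]
      rw [← h1, hdrop]; rfl
    have := step_inv para keywords i y st best hy hInv
    have hrec := ih (i + 1) _ _ hdrop' this
    simpa [PySem.List.enumerate_cons] using hrec

-- ===== VERDICT (by name: the statement is the Claim_ definition above) =====
theorem find_smallest_sequentially_covering_subset_spec : Claim_equal_find_smallest_sequentially_covering_subset := by
  intro para keywords _
  unfold Spec_find_smallest_sequentially_covering_subset
  have h0 : StInv para (kwIndex keywords) keywords.length 0
      (List.replicate keywords.length (-1 : Int), List.replicate keywords.length (none : Option Int), none, (-1, -1)) none := by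
    refine ⟨by simp, by simp, ?_, by simp [InvRel]⟩
    intro jn hjn
    simp [latestBefore, hjn]
  have h := main_inv para keywords para 0 _ none rfl h0
  unfold find_smallest_sequentially_covering_subset find_smallest_sequentially_covering_subset_alt
  simp only [Nat.cast_zero] at h
  rcases hb : ((PySem.List.enumerate para (0:Int)).foldl
      (stepB para (kwIndex keywords) ((keywords.length : Int) - 1) (keywords.length - 1)) none) with _ | ⟨L, e⟩ <;>
    rw [hb] at h <;> simp [InvRel] at h <;> simp [h]
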